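-- pv_equiv track=rewrite | github.com/ravipatelxyz/kbc-meta | kbc-cli-realmeta_higher_multireg.py | get_entity_relation_frequencies
-- ===== SOURCE A (Python) =====
-- def get_entity_relation_frequencies(triples):
--     """count frequencies of each entity and predicate, make df of number of each"""
--     subject_set = {s for (s, _, _) in triples}
--     object_set = {o for (_, _, o) in triples}
--     entity_set = subject_set | object_set
--     relation_set = {p for (_, p, _) in triples}
--
--     entity_counts = {}
--     for entity in entity_set:
--         entity_counts[entity] = 0
--         for triple in triples:
--             if entity == triple[0] or entity == triple[2]:
--                 entity_counts[entity] += 1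
--
--     relation_counts = {}
--     for relation in relation_set:
--         relation_counts[relation] = 0
--         for triple in triples:
--             if relation == triple[1]:
--                 relation_counts[relation] += 1
--
--     return entity_counts, relation_counts
-- ===== SOURCE B (Python) =====
-- def get_entity_relation_frequencies(triples):
--     """count frequencies of each entity and predicate, make df of number of each"""
--     entity_counts = {}
--     for (s, _, _) in triples:
--         entity_counts[s] = entity_counts.get(s, 0) + 1
--     for (s, _, o) in triples:
--         if o != s:
--             entity_counts[o] = entity_counts.get(o, 0) + 1
--     relation_counts = {}
--     for (_, p, _) in triples:
--         relation_counts[p] = relation_counts.get(p, 0) + 1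
--     return entity_counts, relation_counts
-- ===== Notes on version B (the rewrite author's own statement) =====
-- stated objective: faster
-- what changed: A builds entity/relation sets and then rescans the whole triple list once per distinct entity and per distinct relation; B makes three linear counting passes over the triples with dict.get-based counters (objects incremented only when o != s, matching A's once-per-triple count for self-loops).
import Mathlib
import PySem

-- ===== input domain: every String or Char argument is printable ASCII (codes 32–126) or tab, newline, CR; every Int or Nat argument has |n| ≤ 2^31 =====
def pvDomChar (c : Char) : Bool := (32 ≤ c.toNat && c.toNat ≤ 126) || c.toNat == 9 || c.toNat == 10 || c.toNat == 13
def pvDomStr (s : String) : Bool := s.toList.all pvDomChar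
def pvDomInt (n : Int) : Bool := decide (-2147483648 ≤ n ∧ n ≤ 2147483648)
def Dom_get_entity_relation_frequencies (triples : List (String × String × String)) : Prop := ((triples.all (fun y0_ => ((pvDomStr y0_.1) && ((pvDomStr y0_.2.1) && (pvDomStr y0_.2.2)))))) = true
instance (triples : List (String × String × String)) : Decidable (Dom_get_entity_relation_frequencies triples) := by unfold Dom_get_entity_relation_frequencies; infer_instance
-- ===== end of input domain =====

-- B replaces A's per-entity/per-relation rescans of the whole triple list by three linear
-- counting passes over the triples (objective: faster). Returned dicts are equal as Python dicts.

-- ===== PORT A =====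
def get_entity_relation_frequencies (triples : List (String × String × String)) :
    (List (String × Int)) × (List (String × Int)) :=
  let subject_set : PySem.Set String := PySem.Set.ofList (triples.map (·.1))
  let object_set : PySem.Set String := PySem.Set.ofList (triples.map (·.2.2))
  let entity_set : PySem.Set String := PySem.Set.union subject_set object_set
  let relation_set : PySem.Set String := PySem.Set.ofList (triples.map (·.2.1))
  -- entity_counts[entity] += 1 on an existing key = insert entity (getD entity 0 + 1)
  let entity_counts : PySem.Dict String Int :=
    entity_set.foldl (fun d e =>
      triples.foldl (fun d t =>
        if e == t.1 || e == t.2.2 then d.insert e (d.getD e 0 + 1) else d)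
        (d.insert e 0)) PySem.Dict.empty
  let relation_counts : PySem.Dict String Int :=
    relation_set.foldl (fun d r =>
      triples.foldl (fun d t =>
        if r == t.2.1 then d.insert r (d.getD r 0 + 1) else d)
        (d.insert r 0)) PySem.Dict.empty
  (entity_counts.items, relation_counts.items)

-- ===== PORT B =====
def get_entity_relation_frequencies_alt (triples : List (String × String × String)) :
    (List (String × Int)) × (List (String × Int)) :=
  let ec1 : PySem.Dict String Int :=
    triples.foldl (fun d t => d.insert t.1 (d.getD t.1 0 + 1)) PySem.Dict.empty
  let ec : PySem.Dict String Int :=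
    triples.foldl (fun d t =>
      if t.2.2 != t.1 then d.insert t.2.2 (d.getD t.2.2 0 + 1) else d) ec1
  let rc : PySem.Dict String Int :=
    triples.foldl (fun d t => d.insert t.2.1 (d.getD t.2.1 0 + 1)) PySem.Dict.empty
  (ec.items, rc.items)

-- ===== PRECONDITION & SPEC =====
def Spec_get_entity_relation_frequencies (triples : List (String × String × String)) (out : (List (String × Int)) × (List (String × Int))) : Prop := out = get_entity_relation_frequencies_alt triples
instance (triples : List (String × String × String)) (out : (List (String × Int)) × (List (String × Int))) : Decidable (Spec_get_entity_relation_frequencies triples out) := by unfold Spec_get_entity_relation_frequencies; infer_instance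

-- ===== CLAIM (what is proved, stated in full; the proofs are below) =====
def Claim_equal_get_entity_relation_frequencies : Prop := ∀ (triples : List (String × String × String)), Dom_get_entity_relation_frequencies triples → Spec_get_entity_relation_frequencies triples (get_entity_relation_frequencies triples)

-- ===== LEMMAS AND PROOFS =====

-- A's inner rescan over the triples, started right after `d[r] = n`, sets r to n + (number of matches).
theorem pvA_inner (P : (String × String × String) → Bool) (r : String) :
    ∀ (l : List (String × String × String)) (d : PySem.Dict String Int) (n : Int),
      l.foldl (fun d t => if P t then d.insert r (d.getD r 0 + 1) else d) (d.insert r n)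
        = d.insert r (n + l.countP P) := by
  intro l
  induction l with
  | nil => simp
  | cons t l ih =>
    intro d n
    by_cases h : P t
    · simp only [List.foldl_cons, h, if_pos, PySem.Dict.getD_insert_self,
        PySem.Dict.insert_insert_self, ih, List.countP_cons_of_pos h]
      congr 1; omega
    · simp only [List.foldl_cons, h, Bool.false_eq_true, if_neg, not_false_iff, ih,
        List.countP_cons_of_neg h]

-- B's second pass only touches keys already present or appends new object keys; its key list.
theorem pvB_keys2 :
    ∀ (l : List (String × String × String)) (d : PySem.Dict String Int),
      (∀ t ∈ l, t.1 ∈ d.keys) →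
      (l.foldl (fun d t => if t.2.2 != t.1 then d.insert t.2.2 (d.getD t.2.2 0 + 1) else d) d).keys
        = PySem.Set.update d.keys (l.map (·.2.2)) := by
  intro l
  induction l with
  | nil => intro d _; simp [PySem.Set.update_nil]
  | cons t l ih =>
    intro d hd
    by_cases h : t.2.2 = t.1
    · have hmem : t.2.2 ∈ d.keys := by rw [h]; exact hd t (by simp)
      have hb : (t.2.2 != t.1) = false := by simp [h]
      rw [List.foldl_cons, List.map_cons, PySem.Set.update_cons, hb]
      simp only [Bool.false_eq_true, if_neg, not_false_iff]
      rw [PySem.Set.add_of_mem hmem]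
      exact ih d (fun t' ht' => hd t' (by simp [ht']))
    · have hne : (t.2.2 != t.1) = true := by simp [h]
      rw [List.foldl_cons, List.map_cons, PySem.Set.update_cons, hne, if_pos rfl]
      have hkeys : (d.insert t.2.2 (d.getD t.2.2 0 + 1)).keys = PySem.Set.add d.keys t.2.2 := by
        by_cases hm : t.2.2 ∈ d.keys
        · rw [PySem.Dict.keys_insert_of_contains _ _ ((PySem.Dict.contains_iff_mem_keys _ _).2 hm),
            PySem.Set.add_of_mem hm]
        · rw [PySem.Dict.keys_insert_of_not_contains _ _
            (by simp [PySem.Dict.contains_eq_decide_mem_keys, hm]),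
            PySem.Set.add_of_not_mem hm]
      rw [ih _ (fun t' ht' => by
        have := hd t' (by simp [ht'])
        simp [PySem.Dict.mem_keys_insert, this]), hkeys]

-- value computed by B's second (conditional) pass
theorem pvB_getD2 :
    ∀ (l : List (String × String × String)) (d : PySem.Dict String Int) (v : String),
      (l.foldl (fun d t => if t.2.2 != t.1 then d.insert t.2.2 (d.getD t.2.2 0 + 1) else d) d).getD v 0
        = d.getD v 0 + (l.countP (fun t => !(t.2.2 == t.1) && t.2.2 == v) : Int) := by
  intro l
  induction l with
  | nil => simp
  | cons t l ih =>
    intro d v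
    by_cases h : t.2.2 = t.1
    · have hb : (t.2.2 != t.1) = false := by simp [h]
      rw [List.foldl_cons, hb]
      simp only [Bool.false_eq_true, if_neg, not_false_iff]
      rw [ih, List.countP_cons]
      simp [h]
    · have hne : (t.2.2 != t.1) = true := by simp [h]
      rw [List.foldl_cons, hne, if_pos rfl, ih, PySem.Dict.getD_insert, List.countP_cons]
      by_cases hv : v = t.2.2
      · simp [hv, h]; ring
      · simp [hv, Ne.symm hv]

-- count bookkeeping: "s or o matches e" = "s matches e" + "o matches e and not a self-loop"
theorem pv_count_split (e : String) :
    ∀ (l : List (String × String × String)),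
      l.countP (fun t => e == t.1 || e == t.2.2)
        = l.countP (fun t => t.1 == e) + l.countP (fun t => !(t.2.2 == t.1) && t.2.2 == e) := by
  intro l
  induction l with
  | nil => rfl
  | cons t l ih =>
    obtain ⟨s, p, o⟩ := t
    simp only [List.countP_cons, ih]
    have hhead : (if (e == s || e == o) = true then 1 else 0)
        = ((if (s == e) = true then 1 else 0) + (if (!(o == s) && (o == e)) = true then 1 else 0)) := by
      by_cases h1 : e = s
      · subst h1
        by_cases h3 : o = e
        · subst h3; simp
        · simp
      · by_cases h2 : e = o
        · subst h2
          simp [h1, Ne.symm h1]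
        · simp [h1, h2, Ne.symm h1, Ne.symm h2]
    rw [hhead]
    omega

theorem pv_keys_ec1 (triples : List (String × String × String)) :
    (triples.foldl (fun d t => d.insert t.1 (d.getD t.1 0 + 1)) (PySem.Dict.empty : PySem.Dict String Int)).keys
      = PySem.Set.ofList (triples.map (·.1)) := by
  rw [PySem.Dict.keys_foldl_insert_key]
  simp [PySem.Set.update_nil_left]

theorem pv_getD_ec1 (triples : List (String × String × String)) (v : String) :
    (triples.foldl (fun d t => d.insert t.1 (d.getD t.1 0 + 1)) PySem.Dict.empty).getD v 0
      = ((triples.map (·.1)).count v : Int) := by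
  have hm : triples.foldl (fun d t => d.insert t.1 (d.getD t.1 0 + 1)) (PySem.Dict.empty : PySem.Dict String Int)
      = (triples.map (·.1)).foldl (fun d x => d.insert x (d.getD x 0 + 1)) PySem.Dict.empty := by
    rw [List.foldl_map]
  rw [hm, PySem.Dict.getD_foldl_insert_add_one]
  simp

-- ===== VERDICT (by name: the statement is the Claim_ definition above) =====
theorem get_entity_relation_frequencies_spec : Claim_equal_get_entity_relation_frequencies := by
  intro triples _
  unfold Spec_get_entity_relation_frequencies get_entity_relation_frequencies get_entity_relation_frequencies_alt
  simp only [pvA_inner]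
  refine congrArg₂ Prod.mk ?_ ?_
  · -- entity dicts
    rw [PySem.Dict.items_foldl_insert_fresh _ (fun e => e)
        (fun e => ((0 : Int) + (triples.countP (fun t => e == t.1 || e == t.2.2) : Int))) PySem.Dict.empty
        (fun a _ => by simp) (by simp only [List.map_id']; exact PySem.Set.nodup_union _ _ (PySem.Set.nodup_ofList _))]
    have hk1 := pv_keys_ec1 triples
    have hkeys : (triples.foldl
        (fun d t => if (t.2.2 != t.1) = true then d.insert t.2.2 (d.getD t.2.2 0 + 1) else d)
        (triples.foldl (fun d t => d.insert t.1 (d.getD t.1 0 + 1)) (PySem.Dict.empty : PySem.Dict String Int))).keys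
        = (PySem.Set.ofList (triples.map fun x => x.1)).union
            (PySem.Set.ofList (triples.map fun x => x.2.2)) := by
      rw [pvB_keys2 triples _ (fun t ht => by
        rw [hk1]; exact (PySem.Set.mem_ofList _ _).2 (List.mem_map_of_mem ht)), hk1]
      have hu : (PySem.Set.ofList (triples.map fun x => x.1)).union
          (PySem.Set.ofList (triples.map fun x => x.2.2))
          = (PySem.Set.ofList (triples.map fun x => x.1)).update
              (PySem.Set.ofList (triples.map fun x => x.2.2)) := rfl
      rw [hu, PySem.Set.update_eq_append_filter, PySem.Set.update_eq_append_filter,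
        PySem.Set.ofList_ofList]
    have hnd : (triples.foldl
        (fun d t => if (t.2.2 != t.1) = true then d.insert t.2.2 (d.getD t.2.2 0 + 1) else d)
        (triples.foldl (fun d t => d.insert t.1 (d.getD t.1 0 + 1)) (PySem.Dict.empty : PySem.Dict String Int))).keys.Nodup := by
      rw [hkeys]; exact PySem.Set.nodup_union _ _ (PySem.Set.nodup_ofList _)
    rw [PySem.Dict.items_eq_map_keys _ hnd 0, hkeys]
    simp only [show (PySem.Dict.empty : PySem.Dict String Int).items = [] from rfl, List.nil_append]
    refine congrArg₂ List.map (funext fun e => ?_) rfl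
    rw [pvB_getD2, pv_getD_ec1, pv_count_split e triples]
    have hsub : triples.countP (fun t => t.1 == e) = (triples.map (fun x => x.1)).count e := by
      rw [List.count_eq_countP, List.countP_map]
      rfl
    simp [hsub]
  · -- relation dicts
    rw [PySem.Dict.items_foldl_insert_fresh _ (fun r => r)
        (fun r => ((0 : Int) + (triples.countP (fun t => r == t.2.1) : Int))) PySem.Dict.empty
        (fun a _ => by simp) (by simp only [List.map_id']; exact PySem.Set.nodup_ofList _)]
    have hm : triples.foldl (fun d t => d.insert t.2.1 (d.getD t.2.1 0 + 1))
        (PySem.Dict.empty : PySem.Dict String Int)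
        = (triples.map (fun x => x.2.1)).foldl (fun d x => d.insert x (d.getD x 0 + 1)) PySem.Dict.empty := by
      rw [List.foldl_map]
    rw [hm, PySem.Dict.foldl_insert_getD_add_one_eq_counter, PySem.Dict.items_counter]
    simp only [show (PySem.Dict.empty : PySem.Dict String Int).items = [] from rfl, List.nil_append]
    refine congrArg₂ List.map (funext fun r => ?_) rfl
    have hc : triples.countP (fun t => r == t.2.1) = (triples.map (fun x => x.2.1)).count r := by
      rw [List.count_eq_countP, List.countP_map]
      refine List.countP_congr (fun t _ => ?_)
      by_cases h : r = t.2.1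
      · simp [h]
      · simp [h, Ne.symm h]
    simp [hc]
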